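-- pv_equiv track=rewrite | github.com/BrettRey/erdos-problem-993 | verify_inductive_consistency.py | check_condC
-- ===== SOURCE A (Python) =====
-- def coeff(poly, k):
--     return poly[k] if 0 <= k < len(poly) else 0
--
-- def check_condC(I_poly, E_poly):
--     """Check Strong Condition C for pair (I, E).
--     b_{k-1}*d_k + b_k*d_{k-1} + a_{k-1}*c_k >= 0 for k >= 1 with b_{k-1} > 0.
--     Here a = I coefficients, b = E coefficients.
--     d_k = a_{k+1}*b_k - a_k*b_{k+1} (LR minor)
--     c_k = b_k^2 - b_{k-1}*b_{k+1} (LC gap of E)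
--     """
--     d_seq = []
--     L = max(len(I_poly), len(E_poly)) + 1
--     for k in range(L):
--         dk = coeff(I_poly, k+1)*coeff(E_poly, k) - coeff(I_poly, k)*coeff(E_poly, k+1)
--         d_seq.append(dk)
--
--     fail_indices = []
--     for k in range(1, L):
--         bkm1 = coeff(E_poly, k-1)
--         if bkm1 == 0:
--             continue
--         bk = coeff(E_poly, k)
--         bkp1 = coeff(E_poly, k+1)
--         akm1 = coeff(I_poly, k-1)
--         ck = bk*bk - bkm1*bkp1
--         val = bkm1*d_seq[k] + bk*d_seq[k-1] + akm1*ck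
--         if val < 0:
--             fail_indices.append((k, val))
--     return fail_indices  # empty = pass
-- ===== SOURCE B (Python) =====
-- def coeff(poly, k):
--     return poly[k] if 0 <= k < len(poly) else 0
--
-- def check_condC(I_poly, E_poly):
--     """Single pass with a rolling pair of LR minors instead of a precomputed d_seq table."""
--     L = max(len(I_poly), len(E_poly)) + 1
--     fail_indices = []
--     d_prev = coeff(I_poly, 1) * coeff(E_poly, 0) - coeff(I_poly, 0) * coeff(E_poly, 1)
--     for k in range(1, L):
--         d_cur = coeff(I_poly, k + 1) * coeff(E_poly, k) - coeff(I_poly, k) * coeff(E_poly, k + 1)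
--         bkm1 = coeff(E_poly, k - 1)
--         if bkm1 != 0:
--             bk = coeff(E_poly, k)
--             ck = bk * bk - bkm1 * coeff(E_poly, k + 1)
--             val = bkm1 * d_cur + bk * d_prev + coeff(I_poly, k - 1) * ck
--             if val < 0:
--                 fail_indices.append((k, val))
--         d_prev = d_cur
--     return fail_indices
-- ===== Notes on version B (the rewrite author's own statement) =====
-- stated objective: alternative
-- what changed: Replaced A's two passes (precompute the full d_seq table over range(L), then re-scan it) by one fused loop that maintains a rolling pair of minors d_prev/d_cur, so no table is built or indexed.
import Mathlib
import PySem

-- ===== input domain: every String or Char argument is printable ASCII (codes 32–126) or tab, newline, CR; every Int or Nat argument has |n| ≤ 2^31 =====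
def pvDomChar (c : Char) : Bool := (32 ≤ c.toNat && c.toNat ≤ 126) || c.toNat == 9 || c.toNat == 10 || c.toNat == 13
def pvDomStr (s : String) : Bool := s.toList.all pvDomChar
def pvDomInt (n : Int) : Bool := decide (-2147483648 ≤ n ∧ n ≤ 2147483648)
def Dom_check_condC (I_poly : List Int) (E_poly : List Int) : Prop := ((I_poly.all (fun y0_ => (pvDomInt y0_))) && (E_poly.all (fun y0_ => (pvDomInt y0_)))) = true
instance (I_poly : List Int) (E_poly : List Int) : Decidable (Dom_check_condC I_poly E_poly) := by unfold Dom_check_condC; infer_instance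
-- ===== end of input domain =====

-- B fuses A's two passes into one loop with a rolling pair of minors instead of the d_seq table (alternative decomposition; return value proved equal).

-- ===== PORT A =====
-- coeff(poly, k) for the nonnegative k the loops use: poly[k] if in range else 0
def pvCoeff (p : List Int) (k : Nat) : Int := if k < p.length then p.getD k 0 else 0

def check_condC (I_poly : List Int) (E_poly : List Int) : List (Int × Int) :=
  let L := max I_poly.length E_poly.length + 1
  -- first loop: build d_seq by appending d_k for k in range(L)
  let d_seq := (List.range L).foldl
    (fun acc k => acc ++ [pvCoeff I_poly (k+1) * pvCoeff E_poly k - pvCoeff I_poly k * pvCoeff E_poly (k+1)]) []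
  -- second loop: for k in range(1, L), index into d_seq (indices are always in range)
  (List.range' 1 (L - 1)).foldl
    (fun acc k =>
      let bkm1 := pvCoeff E_poly (k-1)
      if bkm1 = 0 then acc
      else
        let bk := pvCoeff E_poly k
        let bkp1 := pvCoeff E_poly (k+1)
        let akm1 := pvCoeff I_poly (k-1)
        let ck := bk * bk - bkm1 * bkp1
        let val := bkm1 * d_seq.getD k 0 + bk * d_seq.getD (k-1) 0 + akm1 * ck
        if val < 0 then acc ++ [((k : Int), val)] else acc) []

-- ===== PORT B =====
def check_condC_alt (I_poly : List Int) (E_poly : List Int) : List (Int × Int) :=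
  let L := max I_poly.length E_poly.length + 1
  let d0 := pvCoeff I_poly 1 * pvCoeff E_poly 0 - pvCoeff I_poly 0 * pvCoeff E_poly 1
  -- single loop, state = (d_prev, fail_indices)
  ((List.range' 1 (L - 1)).foldl
    (fun (st : Int × List (Int × Int)) k =>
      let d_cur := pvCoeff I_poly (k+1) * pvCoeff E_poly k - pvCoeff I_poly k * pvCoeff E_poly (k+1)
      let bkm1 := pvCoeff E_poly (k-1)
      let acc :=
        if bkm1 ≠ 0 then
          let bk := pvCoeff E_poly k
          let ck := bk * bk - bkm1 * pvCoeff E_poly (k+1)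
          let val := bkm1 * d_cur + bk * st.1 + pvCoeff I_poly (k-1) * ck
          if val < 0 then st.2 ++ [((k : Int), val)] else st.2
        else st.2
      (d_cur, acc)) (d0, [])).2

-- ===== PRECONDITION & SPEC =====
def Spec_check_condC (I_poly : List Int) (E_poly : List Int) (out : List (Int × Int)) : Prop := out = check_condC_alt I_poly E_poly
instance (I_poly : List Int) (E_poly : List Int) (out : List (Int × Int)) : Decidable (Spec_check_condC I_poly E_poly out) := by unfold Spec_check_condC; infer_instance

-- ===== CLAIM (what is proved, stated in full; the proofs are below) =====
def Claim_equal_check_condC : Prop := ∀ (I_poly : List Int) (E_poly : List Int), Dom_check_condC I_poly E_poly → Spec_check_condC I_poly E_poly (check_condC I_poly E_poly)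

-- ===== LEMMAS AND PROOFS =====

-- the k-th LR minor
def pvD (I E : List Int) (k : Nat) : Int :=
  pvCoeff I (k+1) * pvCoeff E k - pvCoeff I k * pvCoeff E (k+1)

-- A's first loop builds the map over range
theorem pv_foldl_append {α β : Type} (f : α → β) :
    ∀ (l : List α) (acc : List β), l.foldl (fun a k => a ++ [f k]) acc = acc ++ l.map f := by
  intro l
  induction l with
  | nil => simp
  | cons x xs ih => intro acc; simp [List.foldl, ih]

theorem pv_dseq_getD (I E : List Int) (L k : Nat) (hk : k < L) :
    (((List.range L).map (fun k => pvCoeff I (k+1) * pvCoeff E k - pvCoeff I k * pvCoeff E (k+1))).getD k 0)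
      = pvD I E k := by
  rw [List.getD_eq_getElem?_getD]
  simp [hk, pvD]

-- body of A's second loop after d_seq lookups are replaced by pvD
def pvBodyA (I E : List Int) (acc : List (Int × Int)) (k : Nat) : List (Int × Int) :=
  if pvCoeff E (k-1) = 0 then acc
  else
    let val := pvCoeff E (k-1) * pvD I E k + pvCoeff E k * pvD I E (k-1)
      + pvCoeff I (k-1) * (pvCoeff E k * pvCoeff E k - pvCoeff E (k-1) * pvCoeff E (k+1))
    if val < 0 then acc ++ [((k : Int), val)] else acc

-- the fused loop computes the same list, carrying d_prev = pvD (s-1)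
theorem pv_fused (I E : List Int) :
    ∀ (n s : Nat) (acc : List (Int × Int)),
    ((List.range' s n).foldl
      (fun (st : Int × List (Int × Int)) k =>
        let d_cur := pvCoeff I (k+1) * pvCoeff E k - pvCoeff I k * pvCoeff E (k+1)
        let bkm1 := pvCoeff E (k-1)
        let acc' :=
          if bkm1 ≠ 0 then
            let bk := pvCoeff E k
            let ck := bk * bk - bkm1 * pvCoeff E (k+1)
            let val := bkm1 * d_cur + bk * st.1 + pvCoeff I (k-1) * ck
            if val < 0 then st.2 ++ [((k : Int), val)] else st.2
          else st.2
        (d_cur, acc')) (pvD I E (s-1), acc)).2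
    = (List.range' s n).foldl (pvBodyA I E) acc := by
  intro n
  induction n with
  | zero => intro s acc; simp
  | succ m ih =>
    intro s acc
    rw [List.range'_succ]
    simp only [List.foldl]
    have hs : (s + 1) - 1 = s := by omega
    have := ih (s+1)
    rw [hs] at this
    rw [show (pvCoeff I (s+1) * pvCoeff E s - pvCoeff I s * pvCoeff E (s+1)) = pvD I E s from rfl]
    rw [this]
    congr 1
    by_cases h : pvCoeff E (s-1) = 0
    · simp [pvBodyA, h]
    · simp only [pvBodyA, h, ne_eq, not_false_iff, if_pos]
      ring_nf
      simp

theorem check_condC_eq (I E : List Int) : check_condC I E = check_condC_alt I E := by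
  unfold check_condC check_condC_alt
  simp only []
  rw [pv_foldl_append, List.nil_append]
  rw [PySem.List.foldl_congr_mem _ _ (pvBodyA I E) _ ?_]
  · exact (pv_fused I E (max I.length E.length + 1 - 1) 1 []).symm
  · intro acc k hk
    have hmem := List.mem_range'_1.mp hk
    have hkL : k < max I.length E.length + 1 := by omega
    have hk1L : k - 1 < max I.length E.length + 1 := by omega
    simp only [pv_dseq_getD I E _ _ hkL, pv_dseq_getD I E _ _ hk1L, pvBodyA]

-- ===== VERDICT (by name: the statement is the Claim_ definition above) =====
theorem check_condC_spec : Claim_equal_check_condC := by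
  intro I E _
  unfold Spec_check_condC
  exact check_condC_eq I E
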